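-- pv_equiv track=rewrite | github.com/JohnB-Dunsmuir/PO_Processing | Parsers/parser_westnetz.py | detect_westnetz
-- ===== SOURCE A (Python) =====
-- def detect_westnetz(text: str) -> bool:
--     """
--     Detect Westnetz GmbH purchase orders.
--     """
--     if not text:
--         return False
--
--     t = text.lower()
--     triggers = [
--         "westnetz gmbh",
--         "bestellnummer",
--         "lieferdatum",
--         "einkaufssachbearbeiter",
--         "wir sind das netz der",
--     ]
--     return any(trig in t for trig in triggers)
-- ===== SOURCE B (Python) =====
-- TRIGGERS = (
--     "westnetz gmbh",
--     "bestellnummer",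
--     "lieferdatum",
--     "einkaufssachbearbeiter",
--     "wir sind das netz der",
-- )
--
--
-- def detect_westnetz(text: str) -> bool:
--     # Single left-to-right pass: at each position test whether any trigger
--     # starts there, instead of five independent substring scans.
--     t = text.lower()
--     for i in range(len(t)):
--         for trig in TRIGGERS:
--             if t.startswith(trig, i):
--                 return True
--     return False
-- ===== Notes on version B (the rewrite author's own statement) =====
-- stated objective: alternative
-- what changed: Replaced five independent substring scans ('trig in t' per trigger, plus a redundant empty-text guard) by one left-to-right pass over the lowered text that tests all triggers at each position via startswith.
import Mathlib
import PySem

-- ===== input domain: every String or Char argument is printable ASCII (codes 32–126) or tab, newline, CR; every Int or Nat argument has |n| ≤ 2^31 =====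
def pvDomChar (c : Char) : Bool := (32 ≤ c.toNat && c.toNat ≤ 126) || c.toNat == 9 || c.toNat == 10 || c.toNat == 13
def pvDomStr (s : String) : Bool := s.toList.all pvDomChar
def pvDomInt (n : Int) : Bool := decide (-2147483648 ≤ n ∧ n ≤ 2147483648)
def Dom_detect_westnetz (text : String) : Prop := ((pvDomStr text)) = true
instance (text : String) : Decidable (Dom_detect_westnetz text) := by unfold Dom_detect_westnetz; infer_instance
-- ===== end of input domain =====

-- B replaces A's five independent substring scans by one left-to-right pass testing all triggers at each position (alternative decomposition, same cost).

-- ===== PORT A =====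
def detect_westnetz (text : String) : Bool :=
  if text = "" then false
  else
    let t := PySem.Str.lower text
    ["westnetz gmbh", "bestellnummer", "lieferdatum", "einkaufssachbearbeiter",
     "wir sind das netz der"].any (fun trig => PySem.Str.isIn trig t)

-- ===== PORT B =====
def bTriggers : List String :=
  ["westnetz gmbh", "bestellnummer", "lieferdatum",
   "einkaufssachbearbeiter", "wir sind das netz der"]

-- the 'for i in range(len(t))' loop of Source B, as recursion on the suffixes of t
def bScan : List Char → Bool
  | [] => false
  | c :: rest =>
    if bTriggers.any (fun trig => PySem.Chars.startswith (c :: rest) trig.toList) then true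
    else bScan rest

def detect_westnetz_alt (text : String) : Bool :=
  bScan (PySem.Str.lower text).toList

-- ===== PRECONDITION & SPEC =====
def Spec_detect_westnetz (text : String) (out : Bool) : Prop := out = detect_westnetz_alt text
instance (text : String) (out : Bool) : Decidable (Spec_detect_westnetz text out) := by unfold Spec_detect_westnetz; infer_instance

-- ===== CLAIM (what is proved, stated in full; the proofs are below) =====
def Claim_equal_detect_westnetz : Prop := ∀ (text : String), Dom_detect_westnetz text → Spec_detect_westnetz text (detect_westnetz text)

-- ===== LEMMAS AND PROOFS =====

theorem bScan_iff (t : List Char) : bScan t = true ↔ ∃ p ∈ bTriggers, p.toList <:+: t := by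
  induction t with
  | nil =>
    simp [bScan, bTriggers, List.infix_nil]
  | cons c rest ih =>
    simp only [bScan]
    by_cases h : bTriggers.any (fun trig => PySem.Chars.startswith (c :: rest) trig.toList) = true
    · simp only [h, if_true, true_iff]
      rcases List.any_eq_true.mp h with ⟨p, hp, hsw⟩
      exact ⟨p, hp, ((PySem.Chars.startswith_iff _ _).mp hsw).isInfix⟩
    · rw [Bool.not_eq_true] at h
      simp only [h, Bool.false_eq_true, if_false, ih]
      constructor
      · rintro ⟨p, hp, hinf⟩
        exact ⟨p, hp, List.infix_cons_iff.mpr (Or.inr hinf)⟩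
      · rintro ⟨p, hp, hinf⟩
        rcases List.infix_cons_iff.mp hinf with hpre | hinf'
        · have hh : bTriggers.any (fun trig => PySem.Chars.startswith (c :: rest) trig.toList) = true :=
            List.any_eq_true.mpr ⟨p, hp, (PySem.Chars.startswith_iff _ _).mpr hpre⟩
          rw [h] at hh; exact absurd hh (by simp)
        · exact ⟨p, hp, hinf'⟩

-- ===== VERDICT (by name: the statement is the Claim_ definition above) =====
theorem detect_westnetz_spec : Claim_equal_detect_westnetz := by
  unfold Claim_equal_detect_westnetz
  intro text _
  unfold Spec_detect_westnetz detect_westnetz detect_westnetz_alt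
  by_cases he : text = ""
  · subst he; decide
  · simp only [he, if_false]
    rw [Bool.eq_iff_iff, bScan_iff, List.any_eq_true]
    exact exists_congr fun trig => and_congr_right fun _ =>
      (PySem.Str.isIn_iff_infix trig (PySem.Str.lower text))
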